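-- pv_equiv track=rewrite | github.com/LautaroChioli/UBA | IP-2025-1º Cuatri/python/Guia 7/ej6.py | columnas_ordenadas
-- ===== SOURCE A (Python) =====
-- def ordenados(lista: list) -> bool:
--     actual = 0
--     for i in lista:
--         if actual > i:
--             return False
--         actual = i
--     return True
--
-- def columna(matriz: list, columna: int) -> list:
--     columna_n = []
--     for fila in matriz:
--         columna_n.append(fila[columna])
--     return columna_n
--
-- def columnas(matriz: list,):
--     columnas = []
--     for i in range(0, len(matriz[0])):
--         columnas.append(columna(matriz, i))
--     return columnas
--
-- def columnas_ordenadas(matriz: list) -> list: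
--     lista_booleanos: list = []
--     for clmna in columnas(matriz):
--         if ordenados(clmna):
--             lista_booleanos.append(True)
--         else:
--             lista_booleanos.append(False)
--     return lista_booleanos
-- ===== SOURCE B (Python) =====
-- def columnas_ordenadas(matriz: list) -> list:
--     # Single row-major pass: one previous-value per column, no transposed columns built.
--     cols = len(matriz[0])
--     result = [True] * cols
--     prev = [0] * cols
--     for fila in matriz:
--         result = [ok and p <= x for ok, p, x in zip(result, prev, fila)]
--         prev = fila[:cols]
--     return result
-- ===== Notes on version B (the rewrite author's own statement) =====
-- stated objective: alternative
-- what changed: B makes a single row-major pass keeping one previous value per column (vectorised over the row), instead of A's materialising every transposed column and then testing each with an early-return scan.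
import Mathlib
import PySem

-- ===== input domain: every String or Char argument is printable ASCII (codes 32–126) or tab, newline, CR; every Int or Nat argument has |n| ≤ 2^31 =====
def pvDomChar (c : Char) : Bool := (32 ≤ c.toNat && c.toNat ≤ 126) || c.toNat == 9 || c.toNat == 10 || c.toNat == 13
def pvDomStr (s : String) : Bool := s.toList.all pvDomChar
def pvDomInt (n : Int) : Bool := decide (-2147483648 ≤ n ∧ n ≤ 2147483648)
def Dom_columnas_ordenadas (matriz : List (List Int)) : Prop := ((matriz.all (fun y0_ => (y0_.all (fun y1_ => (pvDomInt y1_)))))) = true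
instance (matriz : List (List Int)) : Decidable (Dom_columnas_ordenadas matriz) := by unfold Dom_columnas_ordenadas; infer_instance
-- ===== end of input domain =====

-- B makes a single row-major pass keeping one previous value per column, instead of A's
-- building every transposed column and scanning each; same cost, different traversal.

-- ===== PORT A =====
-- 'ordenados': actual = 0; early return False on a descent
def pvOrdenadosGo : Int → List Int → Bool
  | _, [] => true
  | actual, i :: rest => if actual > i then false else pvOrdenadosGo i rest

def pvOrdenados (lista : List Int) : Bool := pvOrdenadosGo 0 lista

-- 'columna': fila[columna]; in-range under Pre_, so the IndexError case never occurs there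
def pvColumna (matriz : List (List Int)) (c : Int) : List Int :=
  matriz.foldl (fun acc fila => acc ++ [PySem.List.pyGetD fila c 0]) []

-- 'columnas': matriz[0] raises on empty matriz (excluded by Pre_)
def pvColumnas (matriz : List (List Int)) : List (List Int) :=
  (PySem.List.pyRange 0 ((PySem.List.pyGetD matriz 0 ([] : List Int)).length : Int) 1).foldl
    (fun acc i => acc ++ [pvColumna matriz i]) []

def columnas_ordenadas (matriz : List (List Int)) : List Bool :=
  (pvColumnas matriz).foldl
    (fun acc clmna => acc ++ [if pvOrdenados clmna then true else false]) []

-- ===== PORT B =====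
-- the row comprehension: [ok and p <= x for ok, p, x in zip(result, prev, fila)]
def pvRowStep : List Bool → List Int → List Int → List Bool
  | ok :: oks, p :: ps, x :: xs => (ok && decide (p ≤ x)) :: pvRowStep oks ps xs
  | _, _, _ => []

-- the 'for fila in matriz' loop; fila[:cols] = fila.take cols (PySem.List.slice_to_natCast)
def pvLoopB (cols : Nat) : List (List Int) → List Bool → List Int → List Bool
  | [], result, _ => result
  | fila :: rest, result, prev => pvLoopB cols rest (pvRowStep result prev fila) (fila.take cols)

def columnas_ordenadas_alt (matriz : List (List Int)) : List Bool :=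
  let cols := (PySem.List.pyGetD matriz 0 ([] : List Int)).length
  pvLoopB cols matriz (List.replicate cols true) (List.replicate cols 0)

-- ===== PRECONDITION & SPEC =====
-- Pre_ excludes exactly the inputs where Python A raises IndexError: the empty matrix
-- (matriz[0]) and matrices with some row shorter than the first row (fila[columna]).
def Pre_columnas_ordenadas (matriz : List (List Int)) : Prop :=
  matriz ≠ [] ∧ ∀ fila ∈ matriz, (matriz.headD []).length ≤ fila.length
instance (matriz : List (List Int)) : Decidable (Pre_columnas_ordenadas matriz) := by
  unfold Pre_columnas_ordenadas; infer_instance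

def pvWitness_columnas_ordenadas : List (List Int) := [[1, 2], [3, 1]]

def Spec_columnas_ordenadas (matriz : List (List Int)) (out : List Bool) : Prop := out = columnas_ordenadas_alt matriz
instance (matriz : List (List Int)) (out : List Bool) : Decidable (Spec_columnas_ordenadas matriz out) := by unfold Spec_columnas_ordenadas; infer_instance

-- ===== CLAIM (what is proved, stated in full; the proofs are below) =====
def Claim_equal_columnas_ordenadas : Prop := ∀ (matriz : List (List Int)), Dom_columnas_ordenadas matriz → Pre_columnas_ordenadas matriz → Spec_columnas_ordenadas matriz (columnas_ordenadas matriz)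

-- ===== LEMMAS AND PROOFS =====

-- reference per-column fold (proof device, used by both characterisations)
def pvOrdCol : Bool → Int → List Int → Bool
  | r, _, [] => r
  | r, p, x :: xs => pvOrdCol (r && decide (p ≤ x)) x xs

theorem pvOrdCol_false (p : Int) (xs : List Int) : pvOrdCol false p xs = false := by
  induction xs generalizing p with
  | nil => rfl
  | cons x xs ih => simp [pvOrdCol, ih]

theorem pvOrdenadosGo_eq (xs : List Int) (a : Int) :
    pvOrdenadosGo a xs = pvOrdCol true a xs := by
  induction xs generalizing a with
  | nil => rfl
  | cons x xs ih =>
    by_cases h : a > x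
    · simp [pvOrdenadosGo, pvOrdCol, h, not_le.mpr h, pvOrdCol_false]
    · simp [pvOrdenadosGo, pvOrdCol, h, not_lt.mp h, ih]

theorem pvRowStep_length (oks : List Bool) (ps xs : List Int) :
    (pvRowStep oks ps xs).length = min oks.length (min ps.length xs.length) := by
  induction oks generalizing ps xs with
  | nil => simp [pvRowStep]
  | cons o oks ih =>
    cases ps with
    | nil => simp [pvRowStep]
    | cons p ps =>
      cases xs with
      | nil => simp [pvRowStep]
      | cons x xs => simp only [pvRowStep, List.length_cons, ih]; omega

theorem pvRowStep_getD (oks : List Bool) (ps xs : List Int) (j : Nat)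
    (ho : j < oks.length) (hp : j < ps.length) (hx : j < xs.length) :
    (pvRowStep oks ps xs).getD j false
      = (oks.getD j false && decide (ps.getD j 0 ≤ xs.getD j 0)) := by
  induction oks generalizing ps xs j with
  | nil => simp at ho
  | cons o oks ih =>
    cases ps with
    | nil => simp at hp
    | cons p ps =>
      cases xs with
      | nil => simp at hx
      | cons x xs =>
        cases j with
        | zero => rfl
        | succ j =>
          simp only [pvRowStep, List.getD_cons_succ]
          exact ih ps xs j (by simpa using ho) (by simpa using hp) (by simpa using hx)

theorem pvLoopB_char (rows : List (List Int)) (cols : Nat) (result : List Bool) (prev : List Int)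
    (hr : result.length = cols) (hp : prev.length = cols)
    (hrows : ∀ fila ∈ rows, cols ≤ fila.length) :
    (pvLoopB cols rows result prev).length = cols ∧
    ∀ j < cols, (pvLoopB cols rows result prev).getD j false
      = pvOrdCol (result.getD j false) (prev.getD j 0) (rows.map (fun f => f.getD j 0)) := by
  induction rows generalizing result prev with
  | nil => exact ⟨hr, fun j _ => rfl⟩
  | cons fila rest ih =>
    have hfila : cols ≤ fila.length := hrows fila (by simp)
    have hrest : ∀ f ∈ rest, cols ≤ f.length := fun f hf => hrows f (by simp [hf])
    have hr' : (pvRowStep result prev fila).length = cols := by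
      rw [pvRowStep_length]; omega
    have hp' : (fila.take cols).length = cols := by simp; omega
    obtain ⟨hl, hg⟩ := ih (pvRowStep result prev fila) (fila.take cols) hr' hp' hrest
    refine ⟨hl, fun j hj => ?_⟩
    rw [show pvLoopB cols (fila :: rest) result prev
        = pvLoopB cols rest (pvRowStep result prev fila) (fila.take cols) from rfl, hg j hj]
    have h1 : (pvRowStep result prev fila).getD j false
        = (result.getD j false && decide (prev.getD j 0 ≤ fila.getD j 0)) :=
      pvRowStep_getD result prev fila j (by omega) (by omega) (by omega)
    have h2 : (fila.take cols).getD j 0 = fila.getD j 0 := by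
      have hjf : j < fila.length := by omega
      rw [List.getD_eq_getElem _ _ (by omega), List.getD_eq_getElem _ _ hjf,
        List.getElem_take]
    rw [h1, h2]
    rfl

theorem pvFlattenMapSingleton {A B : Type} (g : A → B) (l : List A) :
    (l.map (fun x => [g x])).flatten = l.map g := by
  induction l with
  | nil => rfl
  | cons a l ih => simp [ih]

-- A's output is the per-column map
theorem pvA_char (matriz : List (List Int)) :
    columnas_ordenadas matriz
      = (List.range (PySem.List.pyGetD matriz 0 ([] : List Int)).length).map
          (fun j => pvOrdenados (matriz.map (fun f => f.getD j 0))) := by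
  unfold columnas_ordenadas pvColumnas pvColumna
  rw [PySem.List.foldl_append_singleton_eq_map, PySem.List.foldl_append_singleton_eq_map,
    PySem.List.pyRange_zero_natCast]
  simp only [List.nil_append, List.map_map]
  refine List.map_congr_left (fun j _ => ?_)
  simp only [Function.comp_apply, Bool.if_true_left]
  simp [PySem.List.pyGetD_natCast]
  exact congrArg pvOrdenados (pvFlattenMapSingleton _ matriz)

theorem columnas_ordenadas_eq (matriz : List (List Int)) (h : Pre_columnas_ordenadas matriz) :
    columnas_ordenadas matriz = columnas_ordenadas_alt matriz := by
  obtain ⟨hne, hlen⟩ := h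
  set cols := (PySem.List.pyGetD matriz 0 ([] : List Int)).length with hcols
  have hhead : PySem.List.pyGetD matriz 0 ([] : List Int) = matriz.headD [] := by
    cases matriz with
    | nil => simp at hne
    | cons r rs => simp [PySem.List.pyGetD_zero_cons]
  have hrows : ∀ fila ∈ matriz, cols ≤ fila.length := by
    intro fila hf; rw [hcols, hhead]; exact hlen fila hf
  obtain ⟨hl, hg⟩ := pvLoopB_char matriz cols (List.replicate cols true)
    (List.replicate cols 0) (by simp) (by simp) hrows
  rw [pvA_char]
  unfold columnas_ordenadas_alt
  apply List.ext_getElem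
  · simpa using hl.symm
  · intro j hj1 hj2
    have hjc : j < cols := by simpa using hj1
    have := hg j hjc
    rw [List.getD_eq_getElem _ _ hj2] at this
    rw [this, List.getElem_map, List.getElem_range]
    have e1 : (List.replicate cols true).getD j false = true := by
      rw [List.getD_eq_getElem _ _ (by simpa using hjc)]; simp
    have e2 : (List.replicate cols (0 : Int)).getD j 0 = 0 := by
      rw [List.getD_eq_getElem _ _ (by simpa using hjc)]; simp
    rw [e1, e2]
    simp [pvOrdenados, pvOrdenadosGo_eq]

-- ===== VERDICT (by name: the statement is the Claim_ definition above) =====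
theorem columnas_ordenadas_spec : Claim_equal_columnas_ordenadas := by
  intro matriz _ hpre
  unfold Spec_columnas_ordenadas
  exact columnas_ordenadas_eq matriz hpre
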